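-- pv_equiv track=rewrite | github.com/vandeplaslab/image2image | src/image2image/utilities.py | get_colormap
-- ===== SOURCE A (Python) =====
-- import typing as ty
--
-- PREFERRED_COLORMAPS = [
--     "red",
--     "green",
--     "blue",
--     "magenta",
--     "yellow",
--     "cyan",
-- ]
--
-- def get_colormap(index: int, used: ty.List[str]):
--     """Get colormap that has not been used yet."""
--     if index < len(PREFERRED_COLORMAPS):
--         colormap = PREFERRED_COLORMAPS[index]
--         if colormap not in used:
--             return colormap
--     for colormap in PREFERRED_COLORMAPS:
--         if colormap not in used:
--             return colormap
--     return "gray"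
-- ===== SOURCE B (Python) =====
-- import typing as ty
--
-- PREFERRED_COLORMAPS = [
--     "red",
--     "green",
--     "blue",
--     "magenta",
--     "yellow",
--     "cyan",
-- ]
--
-- def get_colormap(index: int, used: ty.List[str]):
--     """Get colormap that has not been used yet."""
--     free = set(PREFERRED_COLORMAPS) - set(used)
--     if index < len(PREFERRED_COLORMAPS):
--         colormap = PREFERRED_COLORMAPS[index]
--         if colormap in free:
--             return colormap
--     if not free:
--         return "gray"
--     return min(free, key=PREFERRED_COLORMAPS.index)
-- ===== Notes on version B (the rewrite author's own statement) =====
-- stated objective: alternative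
-- what changed: Instead of A's linear first-match scan of the palette with repeated membership tests against used, B computes the set difference free = set(PREFERRED_COLORMAPS) - set(used) once and returns the argmin of free under the palette-rank key (min with key=PREFERRED_COLORMAPS.index), with 'gray' only when free is empty; the indexed candidate is also tested against this set.
import Mathlib
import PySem

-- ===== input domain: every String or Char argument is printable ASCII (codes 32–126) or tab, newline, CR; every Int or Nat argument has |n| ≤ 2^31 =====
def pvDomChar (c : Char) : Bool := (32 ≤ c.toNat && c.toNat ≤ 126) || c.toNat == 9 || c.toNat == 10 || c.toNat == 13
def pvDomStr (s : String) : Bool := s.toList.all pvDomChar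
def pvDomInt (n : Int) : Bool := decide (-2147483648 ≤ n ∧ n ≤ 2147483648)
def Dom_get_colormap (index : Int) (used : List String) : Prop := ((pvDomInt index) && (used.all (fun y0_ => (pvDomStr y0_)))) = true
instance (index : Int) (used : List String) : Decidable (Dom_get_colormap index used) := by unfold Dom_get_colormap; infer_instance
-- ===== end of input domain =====

-- B replaces A's first-match scan of the palette with a set difference plus argmin-by-palette-rank (objective: alternative).

-- ===== PORT A =====
def PREFERRED_COLORMAPS : List String :=
  ["red", "green", "blue", "magenta", "yellow", "cyan"]

-- A's `for colormap in PREFERRED_COLORMAPS: if colormap not in used: return colormap`, then `return "gray"`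
def scanA : List String → List String → String
  | [], _ => "gray"
  | c :: rest, used => if used.contains c then scanA rest used else c

def get_colormap (index : Int) (used : List String) : String :=
  if index < PySem.List.len PREFERRED_COLORMAPS then
    match PySem.List.pyGet? PREFERRED_COLORMAPS index with
    | some colormap =>
        if used.contains colormap then scanA PREFERRED_COLORMAPS used else colormap
    | none => ""  -- IndexError in Python; excluded by Pre_get_colormap
  else scanA PREFERRED_COLORMAPS used

-- ===== PORT B =====
-- B's `min(free, key=PREFERRED_COLORMAPS.index)` (free nonempty; every element of free is
-- in the palette, so `.index` always returns — the `.getD 0` default is never reached)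
def altPick (free : List String) : String :=
  if free = [] then "gray"
  else (PySem.List.min? free
          (fun c => ((PySem.List.index? PREFERRED_COLORMAPS c).getD 0 : Nat))).getD "gray"

def get_colormap_alt (index : Int) (used : List String) : String :=
  let free : PySem.Set String :=
    PySem.Set.diff (PySem.Set.ofList PREFERRED_COLORMAPS) (PySem.Set.ofList used)
  if index < PySem.List.len PREFERRED_COLORMAPS then
    match PySem.List.pyGet? PREFERRED_COLORMAPS index with
    | some colormap =>
        if PySem.Set.contains free colormap then colormap else altPick free
    | none => ""  -- IndexError in Python; excluded by Pre_get_colormap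
  else altPick free

-- ===== PRECONDITION & SPEC =====
-- Pre_ excludes index ≤ -7, where both A and B raise IndexError on PREFERRED_COLORMAPS[index].
def Pre_get_colormap (index : Int) (_used : List String) : Prop := -6 ≤ index
instance (index : Int) (used : List String) : Decidable (Pre_get_colormap index used) := by unfold Pre_get_colormap; infer_instance
def pvWitness_get_colormap : Int × List String := (0, ["red"])
def Spec_get_colormap (index : Int) (used : List String) (out : String) : Prop := out = get_colormap_alt index used
instance (index : Int) (used : List String) (out : String) : Decidable (Spec_get_colormap index used out) := by unfold Spec_get_colormap; infer_instance

-- ===== CLAIM =====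
def Claim_equal_get_colormap : Prop := ∀ (index : Int) (used : List String), Dom_get_colormap index used → Pre_get_colormap index used → Spec_get_colormap index used (get_colormap index used)

-- ===== LEMMAS AND PROOFS =====
-- A's fallback scan equals B's argmin-by-rank over the free set: proved by case analysis
-- on which of the six palette names occur in `used` (both sides then compute to literals).
theorem ofList_pref :
    PySem.Set.ofList ["red", "green", "blue", "magenta", "yellow", "cyan"]
      = ["red", "green", "blue", "magenta", "yellow", "cyan"] := by decide

theorem pick_eq_scan (used : List String) :
    altPick (PySem.Set.diff (PySem.Set.ofList PREFERRED_COLORMAPS) (PySem.Set.ofList used))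
      = scanA PREFERRED_COLORMAPS used := by
  by_cases h1 : "red" ∈ used <;>
  by_cases h2 : "green" ∈ used <;>
  by_cases h3 : "blue" ∈ used <;>
  by_cases h4 : "magenta" ∈ used <;>
  by_cases h5 : "yellow" ∈ used <;>
  by_cases h6 : "cyan" ∈ used <;>
    simp [altPick, scanA, ofList_pref, PREFERRED_COLORMAPS, PySem.Set.diff,
          PySem.Set.mem_ofList, PySem.Set.contains, PySem.List.min?, PySem.List.index?,
          h1, h2, h3, h4, h5, h6] <;> decide

-- membership in the free set, for a palette element, is non-membership in `used`
theorem contains_free (used : List String) (c : String) (hc : c ∈ PREFERRED_COLORMAPS) :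
    PySem.Set.contains
      (PySem.Set.diff (PySem.Set.ofList PREFERRED_COLORMAPS) (PySem.Set.ofList used)) c
      = !used.contains c := by
  fin_cases hc <;>
    simp [PREFERRED_COLORMAPS, ofList_pref, PySem.Set.diff, PySem.Set.mem_ofList,
          PySem.Set.contains]

-- the in-range branch: A's guarded check equals B's free-set test, for any palette element
theorem branch_eq (c : String) (hc : c ∈ PREFERRED_COLORMAPS) (used : List String) :
    (if used.contains c then scanA PREFERRED_COLORMAPS used else c)
      = (if ((PySem.Set.ofList PREFERRED_COLORMAPS).diff (PySem.Set.ofList used)).contains c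
           then c
           else altPick ((PySem.Set.ofList PREFERRED_COLORMAPS).diff (PySem.Set.ofList used))) := by
  rw [contains_free used c hc]
  by_cases hcu : c ∈ used
  · simp [hcu, pick_eq_scan]
  · simp [hcu]

-- ===== VERDICT =====
theorem get_colormap_spec : Claim_equal_get_colormap := by
  intro index used _ _
  unfold Spec_get_colormap get_colormap get_colormap_alt
  by_cases h : index < PySem.List.len PREFERRED_COLORMAPS
  · simp only [h, if_pos]
    cases hco : PySem.List.pyGet? PREFERRED_COLORMAPS index with
    | none => rfl
    | some c => exact branch_eq c (PySem.List.mem_of_pyGet?_eq_some _ hco) used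
  · simp only [h, if_neg, not_false_iff]
    exact (pick_eq_scan used).symm
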